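-- pv_equiv track=rewrite | github.com/KangOxford/AlphaTrade | TradingEnv/envs/match_engine.py | pairs_market_order_liquidating
-- ===== SOURCE A (Python) =====
-- def level_market_order_liquidating(num, obs):
--     '''observation is one row of the flow, observed at specific time t'''
--     i = 0
--     result = 0
--     while num>0:
--         if i>=10:
--             result = -999
--             break
--         num -= obs[i][1]
--         i+=1
--         result = i
--     return result
--
-- def pairs_market_order_liquidating(num, obs):
--     level = level_market_order_liquidating(num, obs)
--     # TODO need the num <=609 the sum of prices at all leveles
--     sum_quantity = 0
--     quantity_list = []
--     for i in range(len(obs)):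
--         sum_quantity+=obs[i][1]
--         quantity_list.append(sum_quantity)
--
--     result = []
--     if level>1:
--         for i in range(level-1):
--             result.append(
--                 [obs[i][0],-obs[i][1]])
--         result.append(
--             [obs[level-1][0],-num+quantity_list[level-2]])
--     if level == 1:
--         result.append([obs[0][0],-num])
--     if level == 0:
--         pass
--     if level == -999:
--         result.append(-999)
--     return result
-- ===== SOURCE B (Python) =====
-- def pairs_market_order_liquidating(num, obs):
--     # single pass: emit each liquidating pair directly while consuming quantity
--     result = []
--     remaining = num
--     i = 0
--     while remaining > 0:
--         if i >= 10:
--             return [-999]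
--         price, qty = obs[i][0], obs[i][1]
--         if remaining <= qty:
--             result.append([price, -remaining])
--             return result
--         result.append([price, -qty])
--         remaining -= qty
--         i += 1
--     return result
-- ===== Notes on version B (the rewrite author's own statement) =====
-- stated objective: simpler
-- what changed: Fuses A's three passes (level search, prefix-sum list over the whole book, indexed reassembly) into one short loop that emits each liquidating pair directly while consuming quantity; Pre_ excludes inputs where A raises IndexError (row shorter than 2 anywhere, or book exhausted) and the book-depth-exhausted case where A returns the bare int -999 inside the list, which is not a value of the declared list-of-pairs type.
-- crash fix: On inputs with a malformed row (length < 2) that lies beyond the levels actually consumed (liquidation completes inside the well-formed first <=10 rows, or num <= 0), A raises IndexError in its prefix-sum pass over all rows while B returns the liquidating pairs built from the consumed rows. — e.g. on pairs_market_order_liquidating(1, [[5, 3], [7]]): A raises IndexError, B returns [[5, -1]]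
import Mathlib
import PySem

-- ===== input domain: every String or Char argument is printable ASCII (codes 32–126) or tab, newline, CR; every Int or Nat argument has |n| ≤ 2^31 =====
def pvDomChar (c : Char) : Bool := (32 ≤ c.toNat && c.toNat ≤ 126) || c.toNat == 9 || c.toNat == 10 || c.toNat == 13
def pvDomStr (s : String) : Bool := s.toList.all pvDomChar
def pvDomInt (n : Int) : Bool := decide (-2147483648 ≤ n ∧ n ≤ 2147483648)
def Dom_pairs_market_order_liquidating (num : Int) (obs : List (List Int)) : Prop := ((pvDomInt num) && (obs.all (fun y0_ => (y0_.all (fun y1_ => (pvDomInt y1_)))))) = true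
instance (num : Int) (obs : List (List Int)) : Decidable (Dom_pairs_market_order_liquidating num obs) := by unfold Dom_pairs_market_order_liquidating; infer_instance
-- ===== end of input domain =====

-- B fuses A's three passes (level search, full prefix-sum list, indexed reassembly) into one
-- short loop emitting each liquidating pair directly; Pre_ excludes inputs where A raises or
-- returns the non-list sentinel -999 inside the result.


-- ===== PORT A =====
-- while loop of level_market_order_liquidating; i increases, bounded by 10.
-- Indexing uses getD: exact under Pre_, which guarantees every index touched is in range
-- and every row has length ≥ 2 (Python raises otherwise; those inputs are outside Pre_).
def levelLoopA (num : Int) (obs : List (List Int)) (i : Nat) (result : Int) : Int :=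
  if 0 < num then
    if 10 ≤ i then -999
    else levelLoopA (num - ((obs.getD i []).getD 1 0)) obs (i + 1) ((i : Int) + 1)
  else result
termination_by 10 - i

def level_market_order_liquidating (num : Int) (obs : List (List Int)) : Int :=
  levelLoopA num obs 0 0

-- the quantity_list loop: for i in range(len(obs)): sum += obs[i][1]; append(sum)
def quantListA (obs : List (List Int)) : List Int :=
  ((List.range obs.length).foldl
    (fun (st : Int × List Int) i =>
      (st.1 + (obs.getD i []).getD 1 0, st.2 ++ [st.1 + (obs.getD i []).getD 1 0]))
    (0, [])).2

def pairs_market_order_liquidating (num : Int) (obs : List (List Int)) : List (List Int) :=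
  let level := level_market_order_liquidating num obs
  let quantity_list := quantListA obs
  let result : List (List Int) := []
  let result :=
    if 1 < level then
      ((PySem.List.pyRange 0 (level - 1) 1).foldl
        (fun acc i => acc ++ [[(obs.getD i.toNat []).getD 0 0, -((obs.getD i.toNat []).getD 1 0)]])
        result)
      ++ [[(obs.getD (level - 1).toNat []).getD 0 0, -num + quantity_list.getD (level - 2).toNat 0]]
    else result
  let result := if level = 1 then result ++ [[(obs.getD 0 []).getD 0 0, -num]] else result
  -- level == 0: pass.  level == -999: Python appends the bare int -999, which is not a
  -- List Int; that case is outside Pre_ (we put [-999] as a row here, never reached on Pre_).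
  let result := if level = -999 then result ++ [[-999]] else result
  result

-- ===== PORT B =====
-- single pass of Source B; i bounded by 10.  The i ≥ 10 branch (Python: return [-999], a bare
-- int in a list, untypeable) is outside Pre_; we return [[-999]] there.
def altLoopB (remaining : Int) (obs : List (List Int)) (i : Nat) (result : List (List Int)) :
    List (List Int) :=
  if 0 < remaining then
    if 10 ≤ i then [[-999]]
    else
      let price := (obs.getD i []).getD 0 0
      let qty := (obs.getD i []).getD 1 0
      if remaining ≤ qty then result ++ [[price, -remaining]]
      else altLoopB (remaining - qty) obs (i + 1) (result ++ [[price, -qty]])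
  else result
termination_by 10 - i

def pairs_market_order_liquidating_alt (num : Int) (obs : List (List Int)) : List (List Int) :=
  altLoopB num obs 0 []

-- ===== PRECONDITION & SPEC =====
-- Pre_ excludes (a) inputs where A raises IndexError (a row of length < 2 anywhere in obs, or
-- the book exhausted before num is consumed), and (b) inputs where the first 10 levels cannot
-- absorb num, where A returns [-999] — the bare int -999 inside the list is not a value of the
-- declared type List (List Int).  Second conjunct: some prefix sum (including the empty one, 0)
-- of the first ≤ 10 quantities is ≥ num.
def Pre_pairs_market_order_liquidating (num : Int) (obs : List (List Int)) : Prop :=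
  (∀ r ∈ obs, 2 ≤ r.length) ∧
  ((((obs.take 10).map (fun r => r.getD 1 0)).scanl (· + ·) 0).any
      (fun s => decide (num ≤ s))) = true

instance (num : Int) (obs : List (List Int)) :
    Decidable (Pre_pairs_market_order_liquidating num obs) := by
  unfold Pre_pairs_market_order_liquidating; infer_instance

def pvWitness_pairs_market_order_liquidating : Int × List (List Int) :=
  (5, [[100, 3], [99, 4]])

-- On inputs with some row of length < 2 but where liquidation completes inside the well-formed
-- first ≤ 10 rows (or num ≤ 0), A raises IndexError in its prefix-sum pass over ALL rows while
-- B returns the liquidating pairs built from the rows it actually consumed.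
def Raises_pairs_market_order_liquidating (num : Int) (obs : List (List Int)) : Prop :=
  (∃ r ∈ obs, r.length < 2) ∧
  (((((obs.takeWhile (fun r => decide (2 ≤ r.length))).take 10).map
        (fun r => r.getD 1 0)).scanl (· + ·) 0).any
      (fun s => decide (num ≤ s))) = true

instance (num : Int) (obs : List (List Int)) :
    Decidable (Raises_pairs_market_order_liquidating num obs) := by
  unfold Raises_pairs_market_order_liquidating; infer_instance

def pvRaiseWitness_pairs_market_order_liquidating : Int × List (List Int) :=
  (1, [[5, 3], [7]])

def pvRaiseWitnessOut_pairs_market_order_liquidating : List (List Int) := [[5, -1]]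

def Spec_pairs_market_order_liquidating (num : Int) (obs : List (List Int)) (out : List (List Int)) : Prop := out = pairs_market_order_liquidating_alt num obs
instance (num : Int) (obs : List (List Int)) (out : List (List Int)) : Decidable (Spec_pairs_market_order_liquidating num obs out) := by unfold Spec_pairs_market_order_liquidating; infer_instance

-- ===== CLAIM (what is proved, stated in full; the proofs are below) =====
def Claim_equal_pairs_market_order_liquidating : Prop := ∀ (num : Int) (obs : List (List Int)), Dom_pairs_market_order_liquidating num obs → Pre_pairs_market_order_liquidating num obs → Spec_pairs_market_order_liquidating num obs (pairs_market_order_liquidating num obs)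

def Claim_raises_pairs_market_order_liquidating : Prop := (∀ (num : Int) (obs : List (List Int)), Dom_pairs_market_order_liquidating num obs → Raises_pairs_market_order_liquidating num obs → ¬ Pre_pairs_market_order_liquidating num obs) ∧ (Dom_pairs_market_order_liquidating (pvRaiseWitness_pairs_market_order_liquidating.1) (pvRaiseWitness_pairs_market_order_liquidating.2) ∧ Raises_pairs_market_order_liquidating (pvRaiseWitness_pairs_market_order_liquidating.1) (pvRaiseWitness_pairs_market_order_liquidating.2) ∧ pairs_market_order_liquidating_alt (pvRaiseWitness_pairs_market_order_liquidating.1) (pvRaiseWitness_pairs_market_order_liquidating.2) = pvRaiseWitnessOut_pairs_market_order_liquidating)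

-- ===== LEMMAS AND PROOFS =====

-- abbreviations for proofs only
def qOf (r : List Int) : Int := r.getD 1 0

-- the reference single-pass builder (proof-side; structural on obs)
def buildR : Int → List (List Int) → List (List Int)
  | _, [] => []
  | num, r :: rest =>
    if num ≤ qOf r then [[r.getD 0 0, -num]]
    else [r.getD 0 0, -(qOf r)] :: buildR (num - qOf r) rest

theorem buildR_cons (num : Int) (r : List Int) (rest : List (List Int)) :
    buildR num (r :: rest) = if num ≤ qOf r then [[r.getD 0 0, -num]]
      else [r.getD 0 0, -(qOf r)] :: buildR (num - qOf r) rest := rfl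

-- "liquidation of num completes strictly inside the first f rows of l" (0 < num context)
def GoodF : Int → List (List Int) → Nat → Prop
  | _, _, 0 => False
  | _, [], _ + 1 => False
  | num, r :: rest, f + 1 => num ≤ qOf r ∨ GoodF (num - qOf r) rest f

-- number of levels consumed
def countR : Int → List (List Int) → Nat
  | _, [] => 0
  | num, r :: rest => if num ≤ qOf r then 1 else 1 + countR (num - qOf r) rest

theorem countR_cons (num : Int) (r : List Int) (rest : List (List Int)) :
    countR num (r :: rest) = if num ≤ qOf r then 1 else 1 + countR (num - qOf r) rest := rfl

theorem scanl_add_shift (t : List Int) (a : Int) :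
    List.scanl (· + ·) a t = (List.scanl (· + ·) 0 t).map (a + ·) := by
  induction t generalizing a with
  | nil => simp
  | cons b t ih =>
    simp only [List.scanl_cons, List.map_cons, add_zero, zero_add]
    rw [ih (a + b), ih b, List.map_map]
    refine congrArg _ ?_
    apply List.map_congr_left
    intro x _
    simp [Function.comp, add_assoc]

theorem bridge (l : List (List Int)) (f : Nat) (num : Int) :
    ((((l.take f).map (fun r => r.getD 1 0)).scanl (· + ·) 0).any
        (fun s => decide (num ≤ s))) = true ↔ (num ≤ 0 ∨ GoodF num l f) := by
  induction l generalizing f num with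
  | nil => cases f <;> simp [GoodF]
  | cons r rest ih =>
    cases f with
    | zero => simp [GoodF]
    | succ f =>
      simp only [List.take_succ_cons, List.map_cons, List.scanl_cons, List.any_cons,
        Bool.or_eq_true, decide_eq_true_eq, GoodF]
      rw [scanl_add_shift]
      have h2 : (((List.scanl (· + ·) 0 ((rest.take f).map (fun r => r.getD 1 0))).map
            ((0 + r.getD 1 0) + ·)).any (fun s => decide (num ≤ s))) = true
          ↔ (num - qOf r ≤ 0 ∨ GoodF (num - qOf r) rest f) := by
        rw [← ih f (num - qOf r)]
        simp only [List.any_map]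
        constructor <;>
          · intro h
            rcases List.any_eq_true.1 h with ⟨x, hx, hle⟩
            refine List.any_eq_true.2 ⟨x, hx, ?_⟩
            simp only [Function.comp, decide_eq_true_eq] at *
            simp only [qOf] at *
            omega
      rw [h2]
      simp only [qOf]
      have harith : num - r.getD 1 0 ≤ 0 ↔ num ≤ r.getD 1 0 := by omega
      rw [harith]

theorem goodF_ne_nil {num : Int} {l : List (List Int)} {f : Nat} (h : GoodF num l f) :
    l ≠ [] := by
  cases l with
  | nil => cases f <;> simp [GoodF] at h
  | cons r t => simp

theorem countR_le_length {num : Int} {l : List (List Int)} {f : Nat} (h : GoodF num l f) :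
    countR num l ≤ l.length := by
  induction l generalizing num f with
  | nil => simp [countR]
  | cons r t ih =>
    cases f with
    | zero => simp [GoodF] at h
    | succ f =>
      simp only [GoodF] at h
      by_cases hle : num ≤ qOf r
      · simp [countR, hle]
      · rcases h with h | h
        · exact absurd h hle
        · simp only [countR, if_neg hle, List.length_cons]
          have := ih h
          omega

-- drop-indexing helpers
theorem drop_eq_cons_getD {obs : List (List Int)} {i : Nat} {r : List Int}
    {rest : List (List Int)} (h : obs.drop i = r :: rest) :
    obs.getD i [] = r ∧ obs.drop (i + 1) = rest := by
  constructor
  · have h0 : (obs.drop i).getD 0 [] = r := by rw [h]; rfl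
    rw [← h0]
    rcases Nat.lt_or_ge i obs.length with hi | hi
    · simp [List.getD_eq_getElem?_getD, List.getElem?_drop]
    · exfalso; have := List.drop_eq_nil_of_le hi; rw [this] at h; simp at h
  · have : obs.drop (i + 1) = (obs.drop i).drop 1 := by
      rw [List.drop_drop]
    rw [this, h]; rfl

-- B's loop equals the reference builder
theorem altLoopB_eq (f : Nat) : ∀ (i : Nat) (num : Int) (obs acc : List (List Int)),
    i + f = 10 → 0 < num → GoodF num (obs.drop i) f →
    altLoopB num obs i acc = acc ++ buildR num (obs.drop i) := by
  induction f with
  | zero => intro i num obs acc hif hnum hg; simp [GoodF] at hg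
  | succ f ih =>
    intro i num obs acc hif hnum hg
    rcases hdrop : obs.drop i with _ | ⟨r, rest⟩
    · rw [hdrop] at hg; simp [GoodF] at hg
    · rw [hdrop] at hg
      obtain ⟨hget, hdrop1⟩ := drop_eq_cons_getD hdrop
      simp only [GoodF] at hg
      rw [altLoopB]
      rw [if_pos hnum, if_neg (by omega : ¬ 10 ≤ i)]
      simp only [hget]
      by_cases hle : num ≤ r.getD 1 0
      · rw [if_pos hle, buildR_cons, if_pos (show num ≤ qOf r from hle)]
      · rw [if_neg hle]
        rcases hg with hg | hg
        · exact absurd hg hle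
        · rw [ih (i + 1) (num - r.getD 1 0) obs (acc ++ [[r.getD 0 0, -(r.getD 1 0)]])
            (by omega) (by omega) (by rw [hdrop1]; exact hg)]
          rw [hdrop1, buildR_cons, if_neg (show ¬ num ≤ qOf r from hle)]
          rw [List.append_assoc]
          rfl

-- A's level loop counts consumed levels
theorem levelLoopA_eq (f : Nat) : ∀ (i : Nat) (num : Int) (obs : List (List Int)) (res : Int),
    i + f = 10 → 0 < num → GoodF num (obs.drop i) f →
    levelLoopA num obs i res = (i : Int) + (countR num (obs.drop i) : Int) := by
  induction f with
  | zero => intro i num obs res hif hnum hg; simp [GoodF] at hg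
  | succ f ih =>
    intro i num obs res hif hnum hg
    rcases hdrop : obs.drop i with _ | ⟨r, rest⟩
    · rw [hdrop] at hg; simp [GoodF] at hg
    · rw [hdrop] at hg
      obtain ⟨hget, hdrop1⟩ := drop_eq_cons_getD hdrop
      simp only [GoodF] at hg
      rw [levelLoopA, if_pos hnum, if_neg (by omega : ¬ 10 ≤ i), hget]
      by_cases hle : num ≤ qOf r
      · have hstop : ¬ 0 < num - r.getD 1 0 := by simp only [qOf] at hle; omega
        rw [levelLoopA, if_neg hstop]
        rw [countR_cons, if_pos hle]
        push_cast; ring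
      · rcases hg with hg | hg
        · exact absurd hg hle
        · rw [ih (i + 1) (num - r.getD 1 0) obs ((i : Int) + 1) (by omega)
            (by simp only [qOf] at hle; omega) (by rw [hdrop1]; exact hg)]
          rw [hdrop1, countR_cons, if_neg hle]
          simp only [qOf]
          push_cast; ring

-- sum of the first k quantities
def sumQ (obs : List (List Int)) (k : Nat) : Int :=
  ((obs.take k).map qOf).sum

theorem sumQ_succ {obs : List (List Int)} {k : Nat} (h : k < obs.length) :
    sumQ obs (k + 1) = sumQ obs k + qOf (obs.getD k []) := by
  unfold sumQ
  rw [List.take_add_one, List.getElem?_eq_getElem h]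
  rw [List.map_append, List.sum_append]
  simp [List.getD_eq_getElem?_getD, List.getElem?_eq_getElem h]

-- characterization of A's quantity_list
theorem quantListA_spec (obs : List (List Int)) :
    quantListA obs = (List.range obs.length).map (fun k => sumQ obs (k + 1)) := by
  unfold quantListA
  have key : ∀ n, n ≤ obs.length →
      ((List.range n).foldl
        (fun (st : Int × List Int) i =>
          (st.1 + (obs.getD i []).getD 1 0, st.2 ++ [st.1 + (obs.getD i []).getD 1 0]))
        (0, [])) = (sumQ obs n, (List.range n).map (fun k => sumQ obs (k + 1))) := by
    intro n hn
    induction n with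
    | zero => simp [sumQ]
    | succ n ih =>
      rw [List.range_succ, List.foldl_append, ih (by omega)]
      simp only [List.foldl_cons, List.foldl_nil]
      rw [List.map_append]
      have hs := sumQ_succ (obs := obs) (k := n) (by omega)
      simp only [qOf] at hs
      refine Prod.ext ?_ ?_ <;> simp [hs]
  rw [key obs.length le_rfl]

-- the range-loop of A as a map
def arange (n : Nat) (obs : List (List Int)) : List (List Int) :=
  (List.range n).map (fun j => [(obs.getD j []).getD 0 0, -((obs.getD j []).getD 1 0)])

theorem arange_cons (k : Nat) (r : List Int) (rest : List (List Int)) :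
    arange (k + 1) (r :: rest) = [r.getD 0 0, -(r.getD 1 0)] :: arange k rest := by
  unfold arange
  simp [List.range_succ_eq_map, List.map_map, Function.comp]

theorem pyRange_foldl_eq_arange (n : Nat) (obs init : List (List Int)) :
    (PySem.List.pyRange 0 (n : Int) 1).foldl
      (fun acc i => acc ++ [[(obs.getD i.toNat []).getD 0 0, -((obs.getD i.toNat []).getD 1 0)]])
      init = init ++ arange n obs := by
  rw [PySem.List.pyRange_zero_natCast, PySem.List.foldl_append_singleton_eq_map]
  unfold arange
  rw [List.map_map]
  refine congrArg _ ?_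
  apply List.map_congr_left
  intro j _
  simp

-- A's assembled result for level = k + 2
def asmb (num : Int) (obs : List (List Int)) (k : Nat) : List (List Int) :=
  arange (k + 1) obs ++ [[(obs.getD (k + 1) []).getD 0 0, -num + sumQ obs (k + 1)]]

theorem countR_pos {num : Int} {l : List (List Int)} (h : l ≠ []) : 1 ≤ countR num l := by
  cases l with
  | nil => simp at h
  | cons r t => by_cases hle : num ≤ qOf r <;> simp [countR, hle]

theorem asmb_eq_buildR : ∀ (obs : List (List Int)) (num : Int) (f k : Nat),
    0 < num → GoodF num obs f → countR num obs = k + 2 → asmb num obs k = buildR num obs := by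
  intro obs
  induction obs with
  | nil => intro num f k _ hg; cases f <;> simp [GoodF] at hg
  | cons r rest ih =>
    intro num f k hnum hg hcount
    cases f with
    | zero => simp [GoodF] at hg
    | succ f =>
      simp only [GoodF] at hg
      by_cases hle : num ≤ qOf r
      · rw [countR_cons, if_pos hle] at hcount; omega
      · rcases hg with hg | hg
        · exact absurd hg hle
        rw [countR_cons, if_neg hle] at hcount
        have hcount' : countR (num - qOf r) rest = k + 1 := by omega
        have hnum' : 0 < num - qOf r := by simp only [qOf] at hle ⊢; omega
        have hbuild : buildR num (r :: rest) =
            [r.getD 0 0, -(qOf r)] :: buildR (num - qOf r) rest := by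
          rw [buildR_cons, if_neg hle]
        have hs : sumQ (r :: rest) (k + 1) = qOf r + sumQ rest k := by
          simp [sumQ]
        cases k with
        | zero =>
          -- countR (num - qOf r) rest = 1: rest = r0 :: rest' with num - qOf r ≤ qOf r0
          rcases hrest : rest with _ | ⟨r0, rest'⟩
          · rw [hrest] at hg; cases f <;> simp [GoodF] at hg
          rw [hrest] at hcount' hg hbuild hs
          cases f with
          | zero => simp [GoodF] at hg
          | succ f =>
            simp only [GoodF] at hg
            have hle0 : num - qOf r ≤ qOf r0 := by
              by_contra hno
              rw [countR_cons, if_neg hno] at hcount'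
              rcases hg with hg | hg
              · exact absurd hg hno
              · have h1 := countR_pos (num := num - qOf r - qOf r0) (goodF_ne_nil hg)
                omega
            rw [hbuild, buildR_cons, if_pos hle0]
            unfold asmb
            rw [show (0 : Nat) + 1 = 1 from rfl, hs]
            have hx : -num + (qOf r + sumQ (r0 :: rest') 0) = -(num - qOf r) := by
              simp [sumQ]; ring
            simp only [arange, List.range_one, List.map_cons, List.map_nil,
              List.getD_cons_succ, List.getD_cons_zero, List.cons_append, List.nil_append, hx]
            simp [qOf]
        | succ k =>
          rw [hbuild, ← ih (num - qOf r) f k hnum' hg hcount']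
          unfold asmb
          rw [arange_cons, hs]
          have hx : -num + (qOf r + sumQ rest (k + 1)) = -(num - qOf r) + sumQ rest (k + 1) := by
            ring
          simp only [List.cons_append, List.getD_cons_succ, hx]
          simp [qOf]

theorem countR_one_head {num : Int} {r : List Int} {rest : List (List Int)} {f : Nat}
    (hg : GoodF num (r :: rest) f) (h1 : countR num (r :: rest) = 1) : num ≤ qOf r := by
  by_contra hno
  rw [countR_cons, if_neg hno] at h1
  cases f with
  | zero => simp [GoodF] at hg
  | succ f =>
    simp only [GoodF] at hg
    rcases hg with hg | hg
    · exact absurd hg hno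
    · have := countR_pos (num := num - qOf r) (goodF_ne_nil hg)
      omega

-- ===== VERDICT (by name: the statement is the Claim_ definition above) =====
theorem pairs_market_order_liquidating_spec : Claim_equal_pairs_market_order_liquidating := by
  intro num obs _ hpre
  obtain ⟨hrows, hany⟩ := hpre
  unfold Spec_pairs_market_order_liquidating
  show pairs_market_order_liquidating num obs = pairs_market_order_liquidating_alt num obs
  have hexp : ∀ (lv : Int), level_market_order_liquidating num obs = lv →
      pairs_market_order_liquidating num obs =
      (if lv = -999 then
        (if lv = 1 then
          (if 1 < lv then
            ((PySem.List.pyRange 0 (lv - 1) 1).foldl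
              (fun acc i => acc ++ [[(obs.getD i.toNat []).getD 0 0, -((obs.getD i.toNat []).getD 1 0)]]) [])
            ++ [[(obs.getD (lv - 1).toNat []).getD 0 0, -num + (quantListA obs).getD (lv - 2).toNat 0]]
          else [])
          ++ [[(obs.getD 0 []).getD 0 0, -num]]
        else
          (if 1 < lv then
            ((PySem.List.pyRange 0 (lv - 1) 1).foldl
              (fun acc i => acc ++ [[(obs.getD i.toNat []).getD 0 0, -((obs.getD i.toNat []).getD 1 0)]]) [])
            ++ [[(obs.getD (lv - 1).toNat []).getD 0 0, -num + (quantListA obs).getD (lv - 2).toNat 0]]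
          else []))
        ++ [[-999]]
      else
        (if lv = 1 then
          (if 1 < lv then
            ((PySem.List.pyRange 0 (lv - 1) 1).foldl
              (fun acc i => acc ++ [[(obs.getD i.toNat []).getD 0 0, -((obs.getD i.toNat []).getD 1 0)]]) [])
            ++ [[(obs.getD (lv - 1).toNat []).getD 0 0, -num + (quantListA obs).getD (lv - 2).toNat 0]]
          else [])
          ++ [[(obs.getD 0 []).getD 0 0, -num]]
        else
          (if 1 < lv then
            ((PySem.List.pyRange 0 (lv - 1) 1).foldl
              (fun acc i => acc ++ [[(obs.getD i.toNat []).getD 0 0, -((obs.getD i.toNat []).getD 1 0)]]) [])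
            ++ [[(obs.getD (lv - 1).toNat []).getD 0 0, -num + (quantListA obs).getD (lv - 2).toNat 0]]
          else []))) := by
    intro lv hlv
    unfold pairs_market_order_liquidating
    rw [hlv]
  unfold pairs_market_order_liquidating_alt
  by_cases hnum : 0 < num
  · -- liquidation happens
    have hg : GoodF num obs 10 := by
      rcases (bridge obs 10 num).1 hany with h | h
      · omega
      · exact h
    have hlev : level_market_order_liquidating num obs = (countR num obs : Int) := by
      unfold level_market_order_liquidating
      have := levelLoopA_eq 10 0 num obs 0 (by omega) hnum (by simpa using hg)
      simpa using this
    have hB : altLoopB num obs 0 [] = buildR num obs := by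
      have := altLoopB_eq 10 0 num obs [] (by omega) hnum (by simpa using hg)
      simpa using this
    rw [hB, hexp _ hlev]
    have hpos : 1 ≤ countR num obs := countR_pos (goodF_ne_nil hg)
    have hlen : countR num obs ≤ obs.length := countR_le_length hg
    rcases Nat.lt_or_ge (countR num obs) 2 with hc | hc
    · -- countR = 1
      have h1 : countR num obs = 1 := by omega
      rw [h1]
      norm_num
      rcases hobs : obs with _ | ⟨r, rest⟩
      · exact absurd (hobs ▸ goodF_ne_nil hg) (by simp)
      · rw [hobs] at hg h1
        have := countR_one_head hg h1
        rw [buildR_cons, if_pos this]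
        rfl
    · -- countR ≥ 2
      obtain ⟨k, hk⟩ : ∃ k, countR num obs = k + 2 := ⟨countR num obs - 2, by omega⟩
      rw [hk]
      have hne9 : ¬ ((k + 2 : Nat) : Int) = -999 := by push_cast; omega
      have hne1 : ¬ ((k + 2 : Nat) : Int) = 1 := by push_cast; omega
      have h1lt : (1 : Int) < ((k + 2 : Nat) : Int) := by push_cast; omega
      rw [if_neg hne9, if_neg hne1, if_pos h1lt]
      have hsub1 : ((k + 2 : Nat) : Int) - 1 = ((k + 1 : Nat) : Int) := by push_cast; ring
      have hsub2 : (((k + 2 : Nat) : Int) - 2).toNat = k := by omega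
      rw [hsub1, pyRange_foldl_eq_arange (k + 1) obs []]
      rw [quantListA_spec]
      have hkl : k < obs.length := by omega
      have hgetq : ((List.range obs.length).map (fun j => sumQ obs (j + 1))).getD
          (((k + 2 : Nat) : Int) - 2).toNat 0 = sumQ obs (k + 1) := by
        rw [hsub2]
        rw [List.getD_eq_getElem?_getD, List.getElem?_map]
        simp [List.getElem?_range hkl]
      rw [hgetq]
      have htonat : (((k + 1 : Nat) : Int)).toNat = k + 1 := by omega
      rw [htonat]
      rw [← asmb_eq_buildR obs num 10 k hnum hg hk]
      unfold asmb
      simp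
  · -- num ≤ 0: level = 0, both sides []
    have hlev : level_market_order_liquidating num obs = 0 := by
      unfold level_market_order_liquidating
      rw [levelLoopA, if_neg hnum]
    rw [hexp 0 hlev, altLoopB, if_neg hnum]
    norm_num

@[simp] theorem pairs_market_order_liquidating_raises : Claim_raises_pairs_market_order_liquidating := by
  unfold Claim_raises_pairs_market_order_liquidating
  constructor
  · intro num obs _ hr hpre
    obtain ⟨⟨r, hrmem, hrlen⟩, _⟩ := hr
    have := hpre.1 r hrmem
    omega
  · refine ⟨by decide, by decide, ?_⟩
    show pairs_market_order_liquidating_alt 1 [[5, 3], [7]] = [[5, -1]]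
    unfold pairs_market_order_liquidating_alt
    rw [altLoopB]
    norm_num
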